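-- pv_equiv track=rewrite | github.com/martinmongi/project_euler | p357.py | cool_sieve
-- ===== SOURCE A (Python) =====
-- from collections import defaultdict
--
-- def cool_sieve(n):
--     c = defaultdict(lambda:[])
--     c[0] = False
--     c[1] = False
--     for i in range(2, n + 1):
--         if c[i] == []:
--             c[i] = False
--             for j in range(2 * i, n + 1, i):
--                 if c[j] == False or j % (i * i) == 0:
--                     c[j] = False
--                 else:
--                     c[j].append(i)
--
--     return {i:c[i] for i in range(2,n+1) if c[i] != False}
-- ===== SOURCE B (Python) =====
-- def cool_sieve(n):
--     # smallest prime factor of every composite <= n (primes never get an entry)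
--     spf = {}
--     for i in range(2, n + 1):
--         if i not in spf:                  # i is prime
--             for j in range(i * i, n + 1, i):
--                 spf.setdefault(j, i)
--     res = {}
--     for j in range(2, n + 1):
--         # factor j by repeatedly dividing out the smallest prime factor
--         m, ps, sq = j, [], True
--         while sq and m in spf:
--             p = spf[m]
--             m //= p
--             if m % p == 0:
--                 sq = False                # a squared prime divides j
--             else:
--                 ps.append(p)
--         if sq:
--             ps.append(m)                  # the remaining (largest) prime
--             if len(ps) >= 2:              # squarefree with >= 2 prime factors
--                 res[j] = ps
--     return res
-- ===== Notes on version B (the rewrite author's own statement) =====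
-- stated objective: faster
-- what changed: Replaces A's defaultdict sieve with tri-state cells (list of primes, or False for primes and non-squarefree numbers, maintained while marking multiples) by factorization: build a smallest-prime-factor dictionary with a sieve that starts at p*p and never overwrites, then factor each j by dividing out its smallest prime factor, keeping j exactly when it is squarefree with at least two prime factors.
import Mathlib
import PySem

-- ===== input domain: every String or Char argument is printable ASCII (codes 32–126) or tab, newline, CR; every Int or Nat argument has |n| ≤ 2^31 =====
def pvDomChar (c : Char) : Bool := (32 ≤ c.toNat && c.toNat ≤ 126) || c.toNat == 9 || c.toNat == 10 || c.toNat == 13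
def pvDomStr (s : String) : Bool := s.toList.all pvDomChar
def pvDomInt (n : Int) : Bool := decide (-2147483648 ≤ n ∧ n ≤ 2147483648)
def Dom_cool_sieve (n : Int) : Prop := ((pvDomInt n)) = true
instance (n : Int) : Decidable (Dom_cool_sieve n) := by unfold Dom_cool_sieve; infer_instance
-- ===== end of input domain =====

-- B replaces A's tri-state defaultdict sieve by a smallest-prime-factor sieve plus per-number factorization (measured constant-factor faster).

-- ===== PORT A =====
-- the inner 'for j in range(2*i, n+1, i)' loop; dict values: none = False, some l = the list l
def cs_inner (n i : Int) (d : PySem.Dict Int (Option (List Int))) : PySem.Dict Int (Option (List Int)) :=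
  (PySem.List.pyRange (2*i) (n+1) i).foldl (fun d j =>
    if d.getD j (some []) = none ∨ PySem.Int.mod j (i*i) = 0 then d.insert j none
    else d.insert j (some ((d.getD j (some [])).getD [] ++ [i]))) d

-- c = defaultdict(lambda:[]); c[0] = False; c[1] = False; then the outer loop over i
def cs_sieve (n : Int) : PySem.Dict Int (Option (List Int)) :=
  (PySem.List.pyRange 2 (n+1) 1).foldl
    (fun d i => if d.getD i (some []) = some [] then cs_inner n i (d.insert i none) else d)
    (((PySem.Dict.empty).insert 0 (none : Option (List Int))).insert 1 none)

-- return {i: c[i] for i in range(2, n+1) if c[i] != False}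
def cool_sieve (n : Int) : List (Int × List Int) :=
  ((PySem.List.pyRange 2 (n+1) 1).foldl (fun acc i =>
      match (cs_sieve n).getD i (some []) with
      | none => acc
      | some l => acc.insert i l)
    (PySem.Dict.empty : PySem.Dict Int (List Int))).items

-- ===== PORT B =====
-- spf = {}; for i: if i not in spf: for j in range(i*i, n+1, i): spf.setdefault(j, i)
def cb_spf (n : Int) : PySem.Dict Int Int :=
  (PySem.List.pyRange 2 (n+1) 1).foldl (fun sp i =>
    if sp.contains i = false then
      (PySem.List.pyRange (i*i) (n+1) i).foldl (fun sp j => sp.setdefault j i) sp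
    else sp) PySem.Dict.empty

-- the 'while sq and m in spf' loop; returns the final (m, ps, sq)
-- (the 2 ≤ p ∧ p ≤ m guard only makes the recursion total; every value the sieve
--  stores satisfies it, so the else branch is never taken for cb_spf dictionaries)
def cb_fac (sp : PySem.Dict Int Int) (m : Int) (ps : List Int) : Int × List Int × Bool :=
  match sp.get? m with
  | none => (m, ps, true)
  | some p =>
    if hg : 2 ≤ p ∧ p ≤ m then
      if PySem.Int.mod (PySem.Int.floordiv m p) p = 0 then (PySem.Int.floordiv m p, ps, false)
      else cb_fac sp (PySem.Int.floordiv m p) (ps ++ [p])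
    else (m, ps, true)
termination_by m.toNat
decreasing_by
  have h1 : PySem.Int.floordiv m p < m := by
    rw [PySem.Int.floordiv_lt_iff_lt_mul (by omega)]
    nlinarith [hg.1, hg.2]
  have h2 : (0:Int) ≤ PySem.Int.floordiv m p := by
    rw [PySem.Int.le_floordiv_iff_mul_le (by omega)]
    have : (0:Int) * p = 0 := zero_mul p
    omega
  omega

-- for j: m, ps, sq = j, [], True; while loop; if sq: ps.append(m); if len(ps) >= 2: res[j] = ps
def cool_sieve_alt (n : Int) : List (Int × List Int) :=
  ((PySem.List.pyRange 2 (n+1) 1).foldl (fun acc j =>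
      let r := cb_fac (cb_spf n) j []
      if r.2.2 then
        let ps := r.2.1 ++ [r.1]
        if 2 ≤ ps.length then acc.insert j ps else acc
      else acc)
    (PySem.Dict.empty : PySem.Dict Int (List Int))).items

-- ===== PRECONDITION & SPEC =====
def Spec_cool_sieve (n : Int) (out : List (Int × List Int)) : Prop := out = cool_sieve_alt n
instance (n : Int) (out : List (Int × List Int)) : Decidable (Spec_cool_sieve n out) := by unfold Spec_cool_sieve; infer_instance

-- ===== CLAIM (what is proved, stated in full; the proofs are below) =====
def Claim_equal_cool_sieve : Prop := ∀ (n : Int), Dom_cool_sieve n → Spec_cool_sieve n (cool_sieve n)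

-- ===== LEMMAS AND PROOFS =====

-- proof-layer primality test: p has no divisor q with 2 <= q < p
def cs_isprime (p : Int) : Bool :=
  (PySem.List.pyRange 2 p 1).all (fun q => PySem.Int.mod p q != 0)

lemma isprime_iff (p : Int) : cs_isprime p = true ↔ ∀ q : Int, 2 ≤ q → q < p → ¬ q ∣ p := by
  simp [cs_isprime, List.all_eq_true, PySem.List.mem_pyRange_one, PySem.Int.mod_eq_zero_iff_dvd]

lemma exists_prime_divisor (j : Int) (hj : 2 ≤ j) :
    ∃ p, 2 ≤ p ∧ cs_isprime p = true ∧ p ∣ j ∧ p ≤ j := by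
  have key : ∀ m : Nat, ∀ j : Int, j.toNat ≤ m → 2 ≤ j →
      ∃ p, 2 ≤ p ∧ cs_isprime p = true ∧ p ∣ j ∧ p ≤ j := by
    intro m
    induction m with
    | zero => intro j hm h2; omega
    | succ m ih =>
      intro j hm h2
      by_cases hp : cs_isprime j = true
      · exact ⟨j, h2, hp, dvd_refl j, le_refl j⟩
      · have : ¬ ∀ q : Int, 2 ≤ q → q < j → ¬ q ∣ j := by
          rw [← isprime_iff]; exact hp
        push Not at this
        obtain ⟨q, h2q, hqj, hdvd⟩ := this
        obtain ⟨p, hp2, hpp, hpd, hpl⟩ := ih q (by omega) h2q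
        exact ⟨p, hp2, hpp, hpd.trans hdvd, by omega⟩
  exact key j.toNat j le_rfl hj

def hasSq (k j : Int) : Bool :=
  (PySem.List.pyRange 2 j 1).any (fun p => decide (p ≤ k) && cs_isprime p && decide (p ∣ j) && decide (p*p ∣ j))

def plist (k j : Int) : List Int :=
  (PySem.List.pyRange 2 j 1).filter (fun p => decide (p ≤ k) && cs_isprime p && decide (p ∣ j))

def sval (n k j : Int) : Option (List Int) :=
  if 0 ≤ j ∧ j ≤ 1 then none
  else if j < 2 ∨ n < j then some []
  else if (j ≤ k ∧ cs_isprime j = true) ∨ hasSq k j = true then none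
  else some (plist k j)

lemma hasSq_iff (k j : Int) : hasSq k j = true ↔
    ∃ p, 2 ≤ p ∧ p < j ∧ p ≤ k ∧ cs_isprime p = true ∧ p ∣ j ∧ p*p ∣ j := by
  rw [hasSq, List.any_eq_true]
  simp only [PySem.List.mem_pyRange_one, Bool.and_eq_true, decide_eq_true_eq]
  exact ⟨fun ⟨p, ⟨a, b⟩, ⟨⟨⟨c, d⟩, e⟩, f⟩⟩ => ⟨p, a, b, c, d, e, f⟩,
         fun ⟨p, a, b, c, d, e, f⟩ => ⟨p, ⟨a, b⟩, ⟨⟨⟨c, d⟩, e⟩, f⟩⟩⟩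

lemma mem_plist_iff (k j p : Int) : p ∈ plist k j ↔
    2 ≤ p ∧ p < j ∧ p ≤ k ∧ cs_isprime p = true ∧ p ∣ j := by
  rw [plist, List.mem_filter]
  simp only [PySem.List.mem_pyRange_one, Bool.and_eq_true, decide_eq_true_eq]
  exact ⟨fun ⟨⟨a, b⟩, ⟨⟨c, d⟩, e⟩⟩ => ⟨a, b, c, d, e⟩,
         fun ⟨a, b, c, d, e⟩ => ⟨⟨a, b⟩, ⟨⟨c, d⟩, e⟩⟩⟩

lemma sval_mid' (n k j : Int) (h2 : 2 ≤ j) (hn : j ≤ n) (hk : k < j) :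
    sval n k j = if hasSq k j = true then none else some (plist k j) := by
  rw [sval, if_neg (by omega), if_neg (by omega)]
  by_cases h : hasSq k j = true
  · rw [if_pos h, if_pos (Or.inr h)]
  · rw [if_neg h, if_neg ?_]
    rintro (⟨h1, _⟩ | hs)
    · omega
    · exact h hs

lemma sval_step_untouched (n k j : Int) (hj : j ≠ k + 1)
    (hu : ¬ ((k+1) ∣ j ∧ 2*(k+1) ≤ j ∧ j ≤ n)) :
    sval n (k+1) j = sval n k j := by
  rw [sval, sval]
  by_cases h1 : 0 ≤ j ∧ j ≤ 1
  · rw [if_pos h1, if_pos h1]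
  by_cases h2 : j < 2 ∨ n < j
  · rw [if_neg h1, if_neg h1, if_pos h2, if_pos h2]
  rw [if_neg h1, if_neg h1, if_neg h2, if_neg h2]
  have hcond : ((j ≤ k+1 ∧ cs_isprime j = true) ∨ hasSq (k+1) j = true)
      ↔ ((j ≤ k ∧ cs_isprime j = true) ∨ hasSq k j = true) := by
    constructor
    · rintro (⟨hle, hp⟩ | hs)
      · rcases lt_or_eq_of_le hle with h | h
        · exact Or.inl ⟨by omega, hp⟩
        · exact absurd h hj
      · rw [hasSq_iff] at hs
        obtain ⟨p, hp2, hpj, hpk, hpp, hpd, hpsq⟩ := hs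
        rcases lt_or_eq_of_le hpk with h | h
        · exact Or.inr ((hasSq_iff k j).mpr ⟨p, hp2, hpj, by omega, hpp, hpd, hpsq⟩)
        · exfalso
          apply hu
          refine ⟨h ▸ hpd, ?_, by omega⟩
          · subst h
            obtain ⟨t, ht⟩ := hpd
            have : 2 ≤ t := by nlinarith
            nlinarith
    · rintro (⟨hle, hp⟩ | hs)
      · exact Or.inl ⟨by omega, hp⟩
      · rw [hasSq_iff] at hs
        obtain ⟨p, hp2, hpj, hpk, hpp, hpd, hpsq⟩ := hs
        exact Or.inr ((hasSq_iff (k+1) j).mpr ⟨p, hp2, hpj, by omega, hpp, hpd, hpsq⟩)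
  by_cases hc : (j ≤ k ∧ cs_isprime j = true) ∨ hasSq k j = true
  · rw [if_pos hc, if_pos (hcond.mpr hc)]
  · rw [if_neg hc, if_neg (fun h => hc (hcond.mp h))]
    congr 1
    apply List.filter_congr
    intro p hp
    rw [PySem.List.mem_pyRange_one] at hp
    by_cases hpk : p ≤ k
    · simp [hpk, show p ≤ k + 1 by omega]
    by_cases hpeq : p = k + 1
    · have hnd : ¬ (cs_isprime p = true ∧ p ∣ j) := by
        rintro ⟨hpp, hpd⟩
        apply hu
        subst hpeq
        refine ⟨hpd, ?_, by omega⟩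
        obtain ⟨t, ht⟩ := hpd
        have : 2 ≤ t := by nlinarith
        nlinarith
      have e1 : decide (p ≤ k + 1) = true := by simp; omega
      have e2 : decide (p ≤ k) = false := by simp only [decide_eq_false_iff_not]; omega
      rw [e1, e2, Bool.true_and, Bool.false_and, Bool.false_and]
      cases hb : cs_isprime p with
      | false => rw [Bool.false_and]
      | true =>
        have : ¬ p ∣ j := fun h => hnd ⟨hb, h⟩
        simp [this]
    · have e1 : decide (p ≤ k + 1) = false := by simp only [decide_eq_false_iff_not]; omega
      have e2 : decide (p ≤ k) = false := by simp only [decide_eq_false_iff_not]; omega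
      rw [e1, e2]

def gv (d : PySem.Dict Int (Option (List Int))) (j : Int) : Option (List Int) := d.getD j (some [])

lemma hasSq_mono {k k' j : Int} (h : hasSq k j = true) (hk : k ≤ k') : hasSq k' j = true := by
  rw [hasSq_iff] at h ⊢
  obtain ⟨p, a, b, c, d, e, f⟩ := h
  exact ⟨p, a, b, by omega, d, e, f⟩

lemma sval_step_composite (n k j : Int) (hcomp : ¬ cs_isprime (k+1) = true) :
    sval n (k+1) j = sval n k j := by
  rw [sval, sval]
  by_cases h1 : 0 ≤ j ∧ j ≤ 1
  · rw [if_pos h1, if_pos h1]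
  by_cases h2 : j < 2 ∨ n < j
  · rw [if_neg h1, if_neg h1, if_pos h2, if_pos h2]
  rw [if_neg h1, if_neg h1, if_neg h2, if_neg h2]
  have hcond : ((j ≤ k+1 ∧ cs_isprime j = true) ∨ hasSq (k+1) j = true)
      ↔ ((j ≤ k ∧ cs_isprime j = true) ∨ hasSq k j = true) := by
    constructor
    · rintro (⟨hle, hp⟩ | hs)
      · rcases lt_or_eq_of_le hle with h | h
        · exact Or.inl ⟨by omega, hp⟩
        · exact absurd (h ▸ hp) hcomp
      · rw [hasSq_iff] at hs
        obtain ⟨p, a, b, c, d, e, f⟩ := hs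
        rcases lt_or_eq_of_le c with h | h
        · exact Or.inr ((hasSq_iff k j).mpr ⟨p, a, b, by omega, d, e, f⟩)
        · exact absurd (h ▸ d) hcomp
    · rintro (⟨hle, hp⟩ | hs)
      · exact Or.inl ⟨by omega, hp⟩
      · exact Or.inr (hasSq_mono hs (by omega))
  by_cases hc : (j ≤ k ∧ cs_isprime j = true) ∨ hasSq k j = true
  · rw [if_pos hc, if_pos (hcond.mpr hc)]
  · rw [if_neg hc, if_neg (fun h => hc (hcond.mp h))]
    congr 1
    apply List.filter_congr
    intro p hp
    rw [PySem.List.mem_pyRange_one] at hp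
    by_cases hpk : p ≤ k
    · simp [hpk, show p ≤ k + 1 by omega]
    by_cases hpeq : p = k + 1
    · cases hb : cs_isprime p with
      | false => rw [Bool.and_assoc, Bool.and_assoc]; simp
      | true => exact absurd (hpeq ▸ hb) hcomp
    · have e1 : decide (p ≤ k + 1) = false := by simp only [decide_eq_false_iff_not]; omega
      have e2 : decide (p ≤ k) = false := by simp only [decide_eq_false_iff_not]; omega
      rw [e1, e2]

lemma plist_succ (i m : Int) (h2 : 2 ≤ i) (him : i ∣ m) (hmi : 2*i ≤ m)
    (hp : cs_isprime i = true) : plist i m = plist (i-1) m ++ [i] := by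
  have hsplit := PySem.List.pyRange_one_append 2 i m (by omega) (by omega)
  have hcons := PySem.List.pyRange_one_cons (a := i) (b := m) (by omega)
  rw [plist, plist, hsplit, hcons, List.filter_append, List.filter_append]
  have hA : List.filter (fun p => decide (p ≤ i) && cs_isprime p && decide (p ∣ m)) (PySem.List.pyRange 2 i 1)
      = List.filter (fun p => decide (p ≤ i - 1) && cs_isprime p && decide (p ∣ m)) (PySem.List.pyRange 2 i 1) := by
    apply List.filter_congr
    intro p hp
    rw [PySem.List.mem_pyRange_one] at hp
    simp [show p ≤ i by omega, show p ≤ i - 1 by omega]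
  have hB : ∀ k0 : Int, k0 ≤ i → List.filter (fun p => decide (p ≤ k0) && cs_isprime p && decide (p ∣ m)) (PySem.List.pyRange (i+1) m 1) = [] := by
    intro k0 hk0
    rw [List.filter_eq_nil_iff]
    intro p hp
    rw [PySem.List.mem_pyRange_one] at hp
    simp only [Bool.and_eq_true, decide_eq_true_eq, not_and]
    intro h
    omega
  rw [List.filter_cons, List.filter_cons]
  rw [show (decide (i ≤ i) && cs_isprime i && decide (i ∣ m)) = true by
        rw [hp, decide_eq_true him]; simp,
      show (decide (i ≤ i - 1) && cs_isprime i && decide (i ∣ m)) = false by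
        rw [show decide (i ≤ i - 1) = false by simp only [decide_eq_false_iff_not]; omega]; simp]
  rw [if_pos rfl, if_neg (by simp), hA, hB i le_rfl, hB (i-1) (by omega)]
  simp

lemma nodup_pyRange_pos (a b s : Int) (hs : 0 < s) : (PySem.List.pyRange a b s).Nodup := by
  rw [PySem.List.pyRange_of_pos a b hs]
  apply List.Nodup.map ?_ (List.nodup_range)
  intro x y h
  have hs' : s ≠ 0 := by omega
  have : s * (x : Int) = s * (y : Int) := by linarith
  exact_mod_cast mul_left_cancel₀ hs' this

lemma step_cell (n i m : Int) (hp : cs_isprime i = true) (h2 : 2 ≤ i)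
    (him : i ∣ m) (hm2i : 2*i ≤ m) (hmn : m ≤ n)
    (d : PySem.Dict Int (Option (List Int))) (hgv : gv d m = sval n (i-1) m) :
    gv (if d.getD m (some []) = none ∨ PySem.Int.mod m (i*i) = 0 then d.insert m none
        else d.insert m (some ((d.getD m (some [])).getD [] ++ [i]))) m = sval n i m := by
  have hm2 : 2 ≤ m := by omega
  have hprev : sval n (i-1) m = if hasSq (i-1) m = true then none else some (plist (i-1) m) :=
    sval_mid' n (i-1) m hm2 hmn (by omega)
  have hcur : sval n i m = if hasSq i m = true then none else some (plist i m) :=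
    sval_mid' n i m hm2 hmn (by omega)
  by_cases hA : hasSq (i-1) m = true
  · have hnone : d.getD m (some []) = none := by rw [show d.getD m (some []) = gv d m from rfl, hgv, hprev, if_pos hA]
    rw [if_pos (Or.inl hnone), gv, PySem.Dict.getD_insert, if_pos rfl, hcur,
        if_pos (hasSq_mono hA (by omega))]
  · have hsome : d.getD m (some []) = some (plist (i-1) m) := by
      rw [show d.getD m (some []) = gv d m from rfl, hgv, hprev, if_neg hA]
    by_cases hsq : (i*i) ∣ m
    · have hmod : PySem.Int.mod m (i*i) = 0 := (PySem.Int.mod_eq_zero_iff_dvd m (i*i)).mpr hsq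
      rw [if_pos (Or.inr hmod), gv, PySem.Dict.getD_insert, if_pos rfl, hcur,
          if_pos ((hasSq_iff i m).mpr ⟨i, h2, by omega, le_rfl, hp, him, hsq⟩)]
    · have hcond : ¬ (d.getD m (some []) = none ∨ PySem.Int.mod m (i*i) = 0) := by
        rintro (h | h)
        · exact Option.some_ne_none _ (hsome ▸ h)
        · exact hsq ((PySem.Int.mod_eq_zero_iff_dvd m (i*i)).mp h)
      rw [if_neg hcond, gv, PySem.Dict.getD_insert, if_pos rfl, hsome, hcur,
          if_neg ?_, Option.getD_some, ← plist_succ i m h2 him hm2i hp]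
      intro hs
      rw [hasSq_iff] at hs
      obtain ⟨p, a, b, c, dd, e, f⟩ := hs
      rcases lt_or_eq_of_le c with h | h
      · exact hA ((hasSq_iff (i-1) m).mpr ⟨p, a, b, by omega, dd, e, f⟩)
      · exact hsq (h ▸ f)

lemma inner_fold (n i : Int) (hp : cs_isprime i = true) (h2 : 2 ≤ i) :
    ∀ (M : List Int) (d : PySem.Dict Int (Option (List Int))),
    (∀ m ∈ M, i ∣ m ∧ 2*i ≤ m ∧ m ≤ n) → M.Nodup →
    (∀ j, gv d j = if j ∈ M then sval n (i-1) j else sval n i j) →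
    ∀ j, gv (M.foldl (fun d j =>
        if d.getD j (some []) = none ∨ PySem.Int.mod j (i*i) = 0 then d.insert j none
        else d.insert j (some ((d.getD j (some [])).getD [] ++ [i]))) d) j = sval n i j := by
  intro M
  induction M with
  | nil =>
    intro d _ _ hd j
    have := hd j
    rwa [if_neg (List.not_mem_nil)] at this
  | cons m M' ih =>
    intro d hM hnd hd
    have hm := hM m (List.mem_cons_self)
    have hdm : gv d m = sval n (i-1) m := by
      have := hd m; rwa [if_pos (List.mem_cons_self)] at this
    apply ih _ (fun x hx => hM x (List.mem_cons_of_mem _ hx)) (List.Nodup.of_cons hnd)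
    intro j
    by_cases hj : j = m
    · subst hj
      rw [if_neg (by intro hmem; exact (List.nodup_cons.mp hnd).1 hmem)]
      exact step_cell n i j hp h2 hm.1 hm.2.1 hm.2.2 d hdm
    · have hskip : gv (if d.getD m (some []) = none ∨ PySem.Int.mod m (i*i) = 0 then d.insert m none
          else d.insert m (some ((d.getD m (some [])).getD [] ++ [i]))) j = gv d j := by
        by_cases hc : d.getD m (some []) = none ∨ PySem.Int.mod m (i*i) = 0
        · rw [if_pos hc, gv, PySem.Dict.getD_insert, if_neg hj]; rfl
        · rw [if_neg hc, gv, PySem.Dict.getD_insert, if_neg hj]; rfl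
      rw [hskip, hd j]
      by_cases hmem : j ∈ M'
      · rw [if_pos (List.mem_cons_of_mem _ hmem), if_pos hmem]
      · rw [if_neg (by rw [List.mem_cons]; rintro (h | h); exact hj h; exact hmem h), if_neg hmem]

lemma sval_one (n j : Int) : sval n 1 j = if 0 ≤ j ∧ j ≤ 1 then none else some [] := by
  rw [sval]
  by_cases h1 : 0 ≤ j ∧ j ≤ 1
  · rw [if_pos h1, if_pos h1]
  rw [if_neg h1, if_neg h1]
  by_cases h2 : j < 2 ∨ n < j
  · rw [if_pos h2]
  have hc : ¬ ((j ≤ 1 ∧ cs_isprime j = true) ∨ hasSq 1 j = true) := by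
    rintro (⟨hle, _⟩ | hs)
    · omega
    · obtain ⟨p, a, b, c, d, e, f⟩ := (hasSq_iff 1 j).mp hs
      omega
  rw [if_neg h2, if_neg hc]
  congr 1
  rw [plist, List.filter_eq_nil_iff]
  intro p hpm hptrue
  rw [PySem.List.mem_pyRange_one] at hpm
  simp only [Bool.and_eq_true, decide_eq_true_eq] at hptrue
  omega

lemma sval_prime_self (n i : Int) (h2 : 2 ≤ i) (hin : i ≤ n) (hp : cs_isprime i = true) :
    sval n (i-1) i = some [] := by
  rw [sval_mid' n (i-1) i h2 hin (by omega), if_neg ?_]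
  · congr 1
    rw [plist, List.filter_eq_nil_iff]
    intro p hpm hptrue
    rw [PySem.List.mem_pyRange_one] at hpm
    simp only [Bool.and_eq_true, decide_eq_true_eq] at hptrue
    exact (isprime_iff i).mp hp p (by omega) (by omega) hptrue.2
  · intro hs
    obtain ⟨p, a, b, c, d, e, f⟩ := (hasSq_iff (i-1) i).mp hs
    exact (isprime_iff i).mp hp p a b e

lemma sval_comp_self (n i : Int) (h2 : 2 ≤ i) (hin : i ≤ n) (hp : ¬ cs_isprime i = true) :
    sval n (i-1) i ≠ some [] := by
  rw [sval_mid' n (i-1) i h2 hin (by omega)]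
  obtain ⟨p, hp2, hpp, hpd, hpl⟩ := exists_prime_divisor i h2
  have hplt : p < i := by
    rcases lt_or_eq_of_le hpl with h | h
    · exact h
    · exact absurd (h ▸ hpp) hp
  by_cases hs : hasSq (i-1) i = true
  · rw [if_pos hs]; exact (Option.some_ne_none []).symm
  · rw [if_neg hs]
    intro h
    have hmem : p ∈ plist (i-1) i := (mem_plist_iff _ _ _).mpr ⟨hp2, hplt, by omega, hpp, hpd⟩
    rw [Option.some_inj.mp h] at hmem
    exact List.not_mem_nil hmem

lemma sieve_inv (n : Int) : ∀ k : Int, 1 ≤ k → k ≤ n →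
    ∀ j, gv ((PySem.List.pyRange 2 (k+1) 1).foldl
      (fun d i => if d.getD i (some []) = some [] then cs_inner n i (d.insert i none) else d)
      (((PySem.Dict.empty).insert 0 (none : Option (List Int))).insert 1 none)) j = sval n k j := by
  intro k hk
  induction k, hk using Int.le_induction with
  | base =>
    intro _ j
    rw [PySem.List.pyRange_one_eq_nil (by omega), List.foldl_nil, sval_one, gv,
        PySem.Dict.getD_insert, PySem.Dict.getD_insert]
    by_cases h1 : j = 1
    · rw [if_pos h1, if_pos (by omega)]
    by_cases h0 : j = 0
    · rw [if_neg h1, if_pos h0, if_pos (by omega)]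
    · rw [if_neg h1, if_neg h0, if_neg (by omega), PySem.Dict.getD_empty]
  | succ k hk1 ih =>
    intro hk1n j
    have ihv := ih (by omega)
    have hkk : k + 1 - 1 = k := by ring
    rw [PySem.List.pyRange_one_succ_right (by omega), List.foldl_append, List.foldl_cons, List.foldl_nil]
    set D := (PySem.List.pyRange 2 (k+1) 1).foldl
      (fun d i => if d.getD i (some []) = some [] then cs_inner n i (d.insert i none) else d)
      (((PySem.Dict.empty).insert 0 (none : Option (List Int))).insert 1 none) with hD
    by_cases hpi : cs_isprime (k+1) = true
    · rw [if_pos ?hprime]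
      case hprime =>
        have hps := sval_prime_self n (k+1) (by omega) (by omega) hpi
        rw [hkk] at hps
        exact (ihv (k+1)).trans hps
      have key := inner_fold n (k+1) hpi (by omega) (PySem.List.pyRange (2*(k+1)) (n+1) (k+1))
          (D.insert (k+1) none) ?hM (nodup_pyRange_pos _ _ _ (by omega)) ?hd j
      case hM =>
        intro m hm
        obtain ⟨ha, hb, hc⟩ := (PySem.List.mem_pyRange_iff_of_pos (by omega) m).mp hm
        refine ⟨?_, ha, by omega⟩
        have h2d : (k+1) ∣ 2*(k+1) := ⟨2, by ring⟩
        have := dvd_add hc h2d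
        rwa [show m - 2*(k+1) + 2*(k+1) = m by ring] at this
      case hd =>
        intro j'
        rw [hkk]
        by_cases hj' : j' = k + 1
        · subst hj'
          rw [gv, PySem.Dict.getD_insert, if_pos rfl,
              if_neg (fun hmem => by
                obtain ⟨ha, _, _⟩ := (PySem.List.mem_pyRange_iff_of_pos (by omega) _).mp hmem
                omega),
              sval, if_neg (by omega), if_neg (by omega),
              if_pos (Or.inl ⟨le_rfl, hpi⟩)]
        · rw [gv, PySem.Dict.getD_insert, if_neg hj', show D.getD j' (some []) = gv D j' from rfl, ihv j']
          by_cases hmem : j' ∈ PySem.List.pyRange (2*(k+1)) (n+1) (k+1)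
          · rw [if_pos hmem]
          · rw [if_neg hmem, ← sval_step_untouched n k j' hj' ?_]
            intro ⟨hdvd, hle, hub⟩
            apply hmem
            rw [PySem.List.mem_pyRange_iff_of_pos (by omega)]
            refine ⟨hle, by omega, ?_⟩
            exact dvd_sub hdvd ⟨2, by ring⟩
      rw [cs_inner]
      exact key
    · rw [if_neg ?hcomp]
      case hcomp =>
        have hps := sval_comp_self n (k+1) (by omega) (by omega) hpi
        rw [hkk] at hps
        exact fun h => hps ((ihv (k+1)).symm.trans h)
      rw [sval_step_composite n k j hpi, ihv j]

-- ----- B-side: the smallest-prime-factor dictionary and the factoring loop -----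

-- the spf entry of j after the outer loop has processed i = 2 .. k:
-- the first prime p ≤ k with p ∣ j and p*p ≤ j
def sfind (k j : Int) : Option Int :=
  (PySem.List.pyRange 2 (k+1) 1).find? (fun p => cs_isprime p && decide (p ∣ j) && decide (p*p ≤ j))

-- all prime divisors of m (including m itself when prime), in increasing order
def pf (m : Int) : List Int :=
  (PySem.List.pyRange 2 (m+1) 1).filter (fun p => cs_isprime p && decide (p ∣ m))

-- m is squarefree
def SqF (m : Int) : Prop := ∀ q : Int, 2 ≤ q → cs_isprime q = true → q ∣ m → ¬ q*q ∣ m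

lemma mem_pf (m x : Int) : x ∈ pf m ↔ 2 ≤ x ∧ x ≤ m ∧ cs_isprime x = true ∧ x ∣ m := by
  rw [pf, List.mem_filter]
  simp only [PySem.List.mem_pyRange_one, Bool.and_eq_true, decide_eq_true_eq]
  exact ⟨fun ⟨⟨a, b⟩, ⟨c, d⟩⟩ => ⟨a, by omega, c, d⟩, fun ⟨a, b, c, d⟩ => ⟨⟨a, by omega⟩, ⟨c, d⟩⟩⟩

lemma pairwise_pf (m : Int) : (pf m).Pairwise (· < ·) := by
  exact List.Pairwise.filter _ (PySem.List.pairwise_lt_pyRange_one 2 (m+1))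

-- every composite has a prime divisor whose square is below it
lemma exists_small_prime_divisor (i : Int) (h2 : 2 ≤ i) (hnp : ¬ cs_isprime i = true) :
    ∃ p, 2 ≤ p ∧ cs_isprime p = true ∧ p ∣ i ∧ p*p ≤ i := by
  have hd : ¬ ∀ q : Int, 2 ≤ q → q < i → ¬ q ∣ i := by rw [← isprime_iff]; exact hnp
  push Not at hd
  obtain ⟨d, hd2, hdi, hdd⟩ := hd
  obtain ⟨p, hp2, hpp, hpd, hpl⟩ := exists_prime_divisor d hd2
  have hpi : p ∣ i := hpd.trans hdd
  by_cases hsq : p*p ≤ i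
  · exact ⟨p, hp2, hpp, hpi, hsq⟩
  · obtain ⟨t, ht⟩ := hpi
    have ht2 : 2 ≤ t := by nlinarith
    have htp : t < p := by nlinarith
    obtain ⟨q, hq2, hqp, hqd, hql⟩ := exists_prime_divisor t ht2
    refine ⟨q, hq2, hqp, ht ▸ Dvd.dvd.mul_left hqd p, by nlinarith⟩

lemma isprime_int_prime (p : Int) (h2 : 2 ≤ p) (hp : cs_isprime p = true) : Prime p := by
  rw [Int.prime_iff_natAbs_prime, Nat.prime_def_lt]
  have h := (isprime_iff p).mp hp
  constructor
  · omega
  · intro m hm hdvd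
    by_contra hne
    have h2m : 2 ≤ m := by
      rcases Nat.lt_or_ge m 2 with h' | h'
      · interval_cases m
        · simp at hdvd; omega
        · omega
      · exact h'
    have hmd : (m : Int) ∣ p := by
      have : (m : Int) ∣ (p.natAbs : Int) := Int.natCast_dvd_natCast.mpr hdvd
      rwa [Int.natAbs_of_nonneg (by omega)] at this
    exact h m (by exact_mod_cast h2m) (by omega) hmd

-- first element found in a strictly increasing list is minimal
lemma find?_first {f : Int → Bool} : ∀ (l : List Int), l.Pairwise (· < ·) →
    ∀ p, l.find? f = some p → ∀ q ∈ l, q < p → f q = false := by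
  intro l
  induction l with
  | nil => intro _ p _ q hq; exact absurd hq (List.not_mem_nil)
  | cons x t ih =>
    intro hpw p hfind q hq hqp
    rw [List.find?_cons] at hfind
    cases hfx : f x with
    | true =>
      simp only [hfx] at hfind
      obtain rfl : x = p := by injection hfind
      rcases List.mem_cons.mp hq with rfl | hqt
      · omega
      · have := (List.pairwise_cons.mp hpw).1 q hqt
        omega
    | false =>
      simp only [hfx] at hfind
      rcases List.mem_cons.mp hq with rfl | hqt
      · exact hfx
      · exact ih (List.pairwise_cons.mp hpw).2 p hfind q hqt hqp

-- two strictly increasing integer lists with the same members are equal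
lemma eq_of_sorted_of_mem : ∀ (l₁ l₂ : List Int), l₁.Pairwise (· < ·) → l₂.Pairwise (· < ·) →
    (∀ x, x ∈ l₁ ↔ x ∈ l₂) → l₁ = l₂ := by
  intro l₁
  induction l₁ with
  | nil =>
    intro l₂ _ _ hmem
    cases l₂ with
    | nil => rfl
    | cons y t => exact absurd ((hmem y).mpr (List.mem_cons_self)) (List.not_mem_nil)
  | cons x t ih =>
    intro l₂ h₁ h₂ hmem
    cases l₂ with
    | nil => exact absurd ((hmem x).mp (List.mem_cons_self)) (List.not_mem_nil)
    | cons y u =>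
      have hxy : x = y := by
        have hx2 : x ∈ y :: u := (hmem x).mp (List.mem_cons_self)
        have hy1 : y ∈ x :: t := (hmem y).mpr (List.mem_cons_self)
        rcases List.mem_cons.mp hx2 with h | hxu
        · exact h
        · rcases List.mem_cons.mp hy1 with h | hyt
          · exact h.symm
          · have h1 := (List.pairwise_cons.mp h₁).1 y hyt
            have h2 := (List.pairwise_cons.mp h₂).1 x hxu
            omega
      subst hxy
      congr 1
      apply ih _ (List.pairwise_cons.mp h₁).2 (List.pairwise_cons.mp h₂).2
      intro z
      constructor
      · intro hz
        have := (hmem z).mp (List.mem_cons_of_mem _ hz)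
        rcases List.mem_cons.mp this with rfl | h
        · have := (List.pairwise_cons.mp h₁).1 z hz; omega
        · exact h
      · intro hz
        have := (hmem z).mpr (List.mem_cons_of_mem _ hz)
        rcases List.mem_cons.mp this with rfl | h
        · have := (List.pairwise_cons.mp h₂).1 z hz; omega
        · exact h

-- facts about sfind when it returns a prime
lemma sfind_some (n m p : Int) (h2 : 2 ≤ m) (hmn : m ≤ n) (h : sfind n m = some p) :
    2 ≤ p ∧ cs_isprime p = true ∧ p ∣ m ∧ p*p ≤ m ∧
    (∀ q, 2 ≤ q → cs_isprime q = true → q ∣ m → p ≤ q) := by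
  have hpred := List.find?_some h
  have hmem := List.mem_of_find?_eq_some h
  rw [PySem.List.mem_pyRange_one] at hmem
  simp only [Bool.and_eq_true, decide_eq_true_eq] at hpred
  obtain ⟨⟨hpp, hpd⟩, hsq⟩ := hpred
  refine ⟨by omega, hpp, hpd, hsq, ?_⟩
  intro q hq2 hqp hqd
  by_contra hlt
  have hqsq : q*q ≤ m := by nlinarith
  have := find?_first _ (PySem.List.pairwise_lt_pyRange_one 2 (n+1)) p h q
    (by rw [PySem.List.mem_pyRange_one]; omega) (by omega)
  simp only [Bool.and_eq_false_iff, decide_eq_false_iff_not] at this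
  rcases this with (h' | h') | h'
  · exact absurd hqp (by simp [h'])
  · exact absurd hqd h'
  · exact absurd hqsq h'

lemma sfind_none (n m : Int) (h2 : 2 ≤ m) (hmn : m ≤ n) (h : sfind n m = none) :
    cs_isprime m = true := by
  by_contra hnp
  obtain ⟨p, hp2, hpp, hpd, hsq⟩ := exists_small_prime_divisor m h2 hnp
  rw [sfind, List.find?_eq_none] at h
  have hplt : p < m := by nlinarith
  exact h p (by rw [PySem.List.mem_pyRange_one]; omega)
    (by simp only [Bool.and_eq_true, decide_eq_true_eq]; exact ⟨⟨hpp, hpd⟩, hsq⟩)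

lemma sfind_prime_none (k m : Int) (hp : cs_isprime m = true) : sfind k m = none := by
  rw [sfind, List.find?_eq_none]
  intro p hpm
  rw [PySem.List.mem_pyRange_one] at hpm
  simp only [Bool.and_eq_true, decide_eq_true_eq, not_and]
  rintro ⟨hpp, hpd⟩ hsq
  have hplt : p < m := by nlinarith
  exact (isprime_iff m).mp hp p (by omega) hplt hpd

-- the inner setdefault loop over a list of distinct keys
lemma setdefault_fold (dd : Int) (A B : Int → Option Int) :
    ∀ (M : List Int) (sp : PySem.Dict Int Int), M.Nodup →
    (∀ m ∈ M, B m = some ((A m).getD dd)) →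
    (∀ j, sp.get? j = if j ∈ M then A j else B j) →
    ∀ j, (M.foldl (fun sp m => sp.setdefault m dd) sp).get? j = B j := by
  intro M
  induction M with
  | nil =>
    intro sp _ _ hd j
    have := hd j
    rwa [if_neg (List.not_mem_nil)] at this
  | cons m M' ih =>
    intro sp hnd hB hd
    have hdm : sp.get? m = A m := by
      have := hd m; rwa [if_pos (List.mem_cons_self)] at this
    apply ih _ (List.Nodup.of_cons hnd) (fun x hx => hB x (List.mem_cons_of_mem _ hx))
    intro j
    by_cases hj : j = m
    · subst hj
      rw [PySem.Dict.get?_setdefault_self, hdm,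
          if_neg (fun hmem => (List.nodup_cons.mp hnd).1 hmem),
          hB j (List.mem_cons_self)]
    · rw [PySem.Dict.get?_setdefault_of_ne _ _ hj, hd j]
      by_cases hmem : j ∈ M'
      · rw [if_pos (List.mem_cons_of_mem _ hmem), if_pos hmem]
      · rw [if_neg (by rw [List.mem_cons]; rintro (h | h); exact hj h; exact hmem h), if_neg hmem]

-- the sieve dictionary is sfind on keys ≤ n, and stores nothing beyond n
lemma spf_inv (n : Int) : ∀ k : Int, 1 ≤ k → k ≤ n →
    ∀ j, ((PySem.List.pyRange 2 (k+1) 1).foldl (fun sp i =>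
      if sp.contains i = false then
        (PySem.List.pyRange (i*i) (n+1) i).foldl (fun sp j => sp.setdefault j i) sp
      else sp) PySem.Dict.empty).get? j = if j ≤ n then sfind k j else none := by
  intro k hk
  induction k, hk using Int.le_induction with
  | base =>
    intro _ j
    rw [PySem.List.pyRange_one_eq_nil (by omega), List.foldl_nil, PySem.Dict.get?_empty,
        sfind, PySem.List.pyRange_one_eq_nil (by omega), List.find?_nil]
    split <;> rfl
  | succ k hk1 ih =>
    intro hk1n j
    have ihv := ih (by omega)
    rw [PySem.List.pyRange_one_succ_right (a := 2) (b := k+1) (by omega), List.foldl_append,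
        List.foldl_cons, List.foldl_nil]
    set D := (PySem.List.pyRange 2 (k+1) 1).foldl (fun sp i =>
      if sp.contains i = false then
        (PySem.List.pyRange (i*i) (n+1) i).foldl (fun sp j => sp.setdefault j i) sp
      else sp) PySem.Dict.empty with hD
    have hsfind_succ : ∀ j', sfind (k+1) j' = (sfind k j').or
        (if cs_isprime (k+1) && decide ((k+1) ∣ j') && decide ((k+1)*(k+1) ≤ j') then some (k+1) else none) := by
      intro j'
      rw [sfind, sfind, PySem.List.pyRange_one_succ_right (a := 2) (b := k+1) (by omega),
          List.find?_append, List.find?_cons, List.find?_nil]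
      cases hb : (cs_isprime (k+1) && decide ((k+1) ∣ j') && decide ((k+1)*(k+1) ≤ j')) with
      | true => rfl
      | false => rfl
    by_cases hpi : cs_isprime (k+1) = true
    · rw [if_pos ?hguard]
      case hguard =>
        rw [PySem.Dict.contains_eq_isSome_get?, ihv (k+1), if_pos (by omega),
            sfind_prime_none k (k+1) hpi, Option.isSome_none]
      apply setdefault_fold (k+1) (fun j' => if j' ≤ n then sfind k j' else none)
        (fun j' => if j' ≤ n then sfind (k+1) j' else none) _ _
        (nodup_pyRange_pos _ _ _ (by omega))
      · intro m hm
        obtain ⟨ha, hb, hc⟩ := (PySem.List.mem_pyRange_iff_of_pos (by omega) m).mp hm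
        have hdvd : (k+1) ∣ m := by
          have := dvd_add hc (⟨k+1, by ring⟩ : (k+1) ∣ (k+1)*(k+1))
          rwa [show m - (k+1)*(k+1) + (k+1)*(k+1) = m by ring] at this
        rw [if_pos (by omega), if_pos (by omega), hsfind_succ m, if_pos (by
          simp only [Bool.and_eq_true, decide_eq_true_eq]
          exact ⟨⟨hpi, hdvd⟩, by omega⟩)]
        cases hs : sfind k m with
        | none => rfl
        | some v => rfl
      · intro j'
        rw [ihv j']
        by_cases hmem : j' ∈ PySem.List.pyRange ((k+1)*(k+1)) (n+1) (k+1)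
        · rw [if_pos hmem]
        · rw [if_neg hmem]
          by_cases hjn' : j' ≤ n
          · rw [if_pos hjn', if_pos hjn', hsfind_succ j']
            cases hs : sfind k j' with
            | some v => rfl
            | none =>
              rw [Option.none_or, if_neg ?_]
              simp only [Bool.and_eq_true, decide_eq_true_eq, not_and]
              rintro ⟨_, hdvd⟩ hsq
              apply hmem
              rw [PySem.List.mem_pyRange_iff_of_pos (by omega)]
              exact ⟨hsq, by omega, dvd_sub hdvd ⟨k+1, by ring⟩⟩
          · rw [if_neg hjn', if_neg hjn']
    · rw [if_neg ?hguard2]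
      case hguard2 =>
        have hne : sfind k (k+1) ≠ none := by
          intro hnone
          obtain ⟨p, hp2, hpp, hpd, hsq⟩ := exists_small_prime_divisor (k+1) (by omega) hpi
          have hplt : p < k+1 := by nlinarith
          rw [sfind, List.find?_eq_none] at hnone
          exact hnone p (by rw [PySem.List.mem_pyRange_one]; omega)
            (by simp only [Bool.and_eq_true, decide_eq_true_eq]; exact ⟨⟨hpp, hpd⟩, hsq⟩)
        rw [PySem.Dict.contains_eq_isSome_get?, ihv (k+1), if_pos (by omega)]
        cases hs : sfind k (k+1) with
        | none => exact absurd hs hne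
        | some v => simp
      rw [ihv j]
      by_cases hjn' : j ≤ n
      · rw [if_pos hjn', if_pos hjn', hsfind_succ j, if_neg (by simp [hpi]), Option.or_none]
      · rw [if_neg hjn', if_neg hjn']

lemma pf_prime (m : Int) (h2 : 2 ≤ m) (hp : cs_isprime m = true) : pf m = [m] := by
  rw [pf, PySem.List.pyRange_one_succ_right (a := 2) (b := m) (by omega),
      List.filter_append, List.filter_cons, List.filter_nil,
      if_pos (by simp only [Bool.and_eq_true, decide_eq_true_eq]; exact ⟨hp, dvd_refl m⟩),
      List.filter_eq_nil_iff.mpr ?_, List.nil_append]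
  intro q hqm hqtrue
  rw [PySem.List.mem_pyRange_one] at hqm
  simp only [Bool.and_eq_true, decide_eq_true_eq] at hqtrue
  exact (isprime_iff m).mp hp q (by omega) (by omega) hqtrue.2

-- a divisor q ≥ 2 of a prime p equals p
lemma dvd_prime_eq (q p : Int) (hq2 : 2 ≤ q) (hp2 : 2 ≤ p) (hp : cs_isprime p = true)
    (hdvd : q ∣ p) : q = p := by
  by_contra hne
  have hlt : q < p := lt_of_le_of_ne (Int.le_of_dvd (by omega) hdvd) hne
  exact (isprime_iff p).mp hp q hq2 hlt hdvd

-- peeling the least prime factor off the front of the factor list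
lemma pf_cons (p m m' : Int) (h2 : 2 ≤ p) (hp : cs_isprime p = true) (hm' : 2 ≤ m')
    (hm : m = p * m') (hnd : ¬ p ∣ m')
    (hmin : ∀ q, 2 ≤ q → cs_isprime q = true → q ∣ m → p ≤ q) :
    pf m = p :: pf m' := by
  have hpm : Prime p := isprime_int_prime p h2 hp
  apply eq_of_sorted_of_mem _ _ (pairwise_pf m)
  · rw [List.pairwise_cons]
    refine ⟨?_, pairwise_pf m'⟩
    intro q hq
    obtain ⟨hq2, hqm, hqp, hqd⟩ := (mem_pf m' q).mp hq
    have hqdm : q ∣ m := hm ▸ Dvd.dvd.mul_left hqd p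
    have hge := hmin q hq2 hqp hqdm
    rcases lt_or_eq_of_le hge with h | h
    · exact h
    · exact absurd (h ▸ hqd) hnd
  · intro x
    rw [mem_pf, List.mem_cons, mem_pf]
    constructor
    · rintro ⟨hx2, hxm, hxp, hxd⟩
      have hxprime : Prime x := isprime_int_prime x hx2 hxp
      rcases (Prime.dvd_mul hxprime).mp (hm ▸ hxd) with hxp' | hxm'
      · exact Or.inl (dvd_prime_eq x p hx2 h2 hp hxp')
      · right
        refine ⟨hx2, ?_, hxp, hxm'⟩
        exact Int.le_of_dvd (by omega) hxm'
    · rintro (hx | ⟨hx2, hxm, hxp, hxd⟩)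
      · subst hx
        exact ⟨h2, by nlinarith, hp, hm ▸ ⟨m', rfl⟩⟩
      · have hxd' : x ∣ m := hm ▸ Dvd.dvd.mul_left hxd p
        refine ⟨hx2, Int.le_of_dvd (by nlinarith) hxd', hxp, hxd'⟩

lemma sqf_step (p m m' : Int) (h2 : 2 ≤ p) (hp : cs_isprime p = true) (hm' : 2 ≤ m')
    (hm : m = p * m') (hnd : ¬ p ∣ m') : (SqF m ↔ SqF m') := by
  constructor
  · intro hs q hq2 hqp hqd hqsq
    exact hs q hq2 hqp (hm ▸ Dvd.dvd.mul_left hqd p) (hm ▸ Dvd.dvd.mul_left hqsq p) 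
  · intro hs q hq2 hqp hqd hqsq
    have hqprime : Prime q := isprime_int_prime q hq2 hqp
    by_cases hqe : q = p
    · subst hqe
      apply hnd
      obtain ⟨c, hc⟩ := hqsq
      have heq : q * m' = q * (q * c) := by rw [← hm, hc]; ring
      exact ⟨c, mul_left_cancel₀ (show (q:Int) ≠ 0 by omega) heq⟩
    · have hqm' : q ∣ m' := by
        rcases (Prime.dvd_mul hqprime).mp (hm ▸ hqd) with h | h
        · exact absurd (dvd_prime_eq q p hq2 h2 hp h) hqe
        · exact h
      obtain ⟨t, ht⟩ := hqm'
      have hqsq' : q * q ∣ m' := by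
        obtain ⟨c, hc⟩ := hqsq
        have hqpt : q ∣ p * t := by
          have hmm : m = q * (p * t) := by rw [hm, ht]; ring
          have heq : q * (q * c) = q * (p * t) := by rw [← mul_assoc, ← hc, hmm]
          exact ⟨c, (mul_left_cancel₀ (show (q:Int) ≠ 0 by omega) heq).symm⟩
        rcases (Prime.dvd_mul hqprime).mp hqpt with h | h
        · exact absurd (dvd_prime_eq q p hq2 h2 hp h) hqe
        · obtain ⟨u, hu⟩ := h
          exact ⟨u, by rw [ht, hu]; ring⟩
      exact hs q hq2 hqp ⟨t, ht⟩ hqsq'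

-- behaviour of the while loop on squarefree / non-squarefree arguments
lemma fac_spec (n : Int) (hn : 1 ≤ n) : ∀ (N : Nat) (m : Int) (ps : List Int),
    m.toNat ≤ N → 2 ≤ m → m ≤ n →
    (SqF m → ∃ L F, pf m = F ++ [L] ∧ cb_fac (cb_spf n) m ps = (L, ps ++ F, true)) ∧
    (¬ SqF m → (cb_fac (cb_spf n) m ps).2.2 = false) := by
  intro N
  induction N with
  | zero => intro m ps hmN h2 _; omega
  | succ N ihN =>
    intro m ps hmN h2 hmn
    have hspf : (cb_spf n).get? m = sfind n m := by
      have := spf_inv n n (by omega) le_rfl m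
      rw [if_pos hmn] at this
      rw [cb_spf]
      exact this
    cases hs : sfind n m with
    | none =>
      have hp := sfind_none n m h2 hmn hs
      have hsqf : SqF m := by
        intro q hq2 hqp hqd hqsq
        have hqm := dvd_prime_eq q m hq2 h2 hp hqd
        subst hqm
        have := Int.le_of_dvd (by omega) hqsq
        nlinarith
      constructor
      · intro _
        refine ⟨m, [], by rw [pf_prime m h2 hp]; rfl, ?_⟩
        rw [cb_fac, hspf, hs]
        simp
      · intro hnsq
        exact absurd hsqf hnsq
    | some p =>
      obtain ⟨hp2, hpp, hpd, hpsq, hmin⟩ := sfind_some n m p h2 hmn hs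
      have hguard : 2 ≤ p ∧ p ≤ m := ⟨hp2, by nlinarith⟩
      have hm'eq : m = p * (PySem.Int.floordiv m p) := by
        rw [PySem.Int.floordiv_eq_ediv_of_pos (by omega)]
        exact (Int.mul_ediv_cancel' hpd).symm
      set m' := PySem.Int.floordiv m p with hm'def
      have hm'2 : 2 ≤ m' := by nlinarith
      have hm'lt : m' < m := by nlinarith
      have hm'nn : 0 ≤ m' := by omega
      have hm'n : m' ≤ n := by omega
      have hmod := PySem.Int.mod_eq_zero_iff_dvd m' p
      by_cases hdvd : p ∣ m'
      · have hsqm : ¬ SqF m := by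
          intro hsq
          refine hsq p hp2 hpp hpd ?_
          obtain ⟨c, hc⟩ := hdvd
          exact ⟨c, by rw [hm'eq, hc]; ring⟩
        constructor
        · intro h; exact absurd h hsqm
        · intro _
          have hmodpos : PySem.Int.mod (PySem.Int.floordiv m p) p = 0 := hmod.mpr hdvd
          rw [cb_fac, hspf]
          simp only [hs, dif_pos hguard, if_pos hmodpos]
      · have hrec := ihN m' (ps ++ [p]) (by omega) hm'2 hm'n
        have hunfold : cb_fac (cb_spf n) m ps = cb_fac (cb_spf n) m' (ps ++ [p]) := by
          have hmodneg : ¬ PySem.Int.mod (PySem.Int.floordiv m p) p = 0 :=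
            fun h => hdvd (hmod.mp h)
          rw [cb_fac, hspf]
          simp only [hs, dif_pos hguard, if_neg hmodneg]
          rfl
        constructor
        · intro hsq
          have hsq' : SqF m' := (sqf_step p m m' hp2 hpp hm'2 hm'eq hdvd).mp hsq
          obtain ⟨L, F, hpf, hcb⟩ := hrec.1 hsq'
          refine ⟨L, p :: F, ?_, ?_⟩
          · rw [pf_cons p m m' hp2 hpp hm'2 hm'eq hdvd hmin, hpf]
            rfl
          · rw [hunfold, hcb]
            simp
        · intro hnsq
          have hnsq' : ¬ SqF m' := fun h => hnsq ((sqf_step p m m' hp2 hpp hm'2 hm'eq hdvd).mpr h)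
          rw [hunfold]
          exact hrec.2 hnsq'

lemma hasSq_iff_not_sqf (n j : Int) (h2 : 2 ≤ j) (hjn : j ≤ n) :
    hasSq n j = true ↔ ¬ SqF j := by
  constructor
  · intro hs hsqf
    obtain ⟨p, a, b, c, d, e, f⟩ := (hasSq_iff n j).mp hs
    exact hsqf p a d e f
  · intro hnsq
    rw [SqF] at hnsq
    push Not at hnsq
    obtain ⟨q, hq2, hqp, hqd, hqsq⟩ := hnsq
    have hqsqle : q*q ≤ j := Int.le_of_dvd (by omega) hqsq
    exact (hasSq_iff n j).mpr ⟨q, hq2, by nlinarith, by nlinarith, hqp, hqd, hqsq⟩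

lemma pf_eq_plist (n j : Int) (h2 : 2 ≤ j) (hjn : j ≤ n) (hnp : ¬ cs_isprime j = true) :
    pf j = plist n j := by
  rw [pf, plist, PySem.List.pyRange_one_succ_right (a := 2) (b := j) (by omega),
      List.filter_append, List.filter_cons, List.filter_nil,
      if_neg (by simp [hnp]), List.append_nil]
  apply List.filter_congr
  intro p hp
  rw [PySem.List.mem_pyRange_one] at hp
  rw [show decide (p ≤ n) = true by simp; omega, Bool.true_and]

lemma two_le_length_of_mem_ne {l : List Int} {a b : Int} (ha : a ∈ l) (hb : b ∈ l)
    (hab : a ≠ b) : 2 ≤ l.length := by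
  match l with
  | [] => exact absurd ha (List.not_mem_nil)
  | [x] =>
    rw [List.mem_singleton] at ha hb
    exact absurd (ha.trans hb.symm) hab
  | x :: y :: t => simp only [List.length_cons]; omega

lemma main_eq (n : Int) : cool_sieve n = cool_sieve_alt n := by
  by_cases hn : n ≤ 1
  · rw [cool_sieve, cool_sieve_alt, PySem.List.pyRange_one_eq_nil (by omega), List.foldl_nil,
        List.foldl_nil]
  · rw [cool_sieve, cool_sieve_alt]
    congr 1
    apply PySem.List.foldl_congr_mem
    intro acc j hj
    rw [PySem.List.mem_pyRange_one] at hj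
    have hsv : (cs_sieve n).getD j (some []) = sval n n j := by
      have := sieve_inv n n (by omega) le_rfl j
      rw [cs_sieve]
      exact this
    rw [hsv, sval, if_neg (by omega), if_neg (by omega)]
    by_cases hsqf : SqF j
    · have hhs : hasSq n j ≠ true := fun h => (hasSq_iff_not_sqf n j (by omega) (by omega)).mp h hsqf
      obtain ⟨L, F, hpf, hcb⟩ :=
        (fac_spec n (by omega) j.toNat j [] le_rfl (by omega) (by omega)).1 hsqf
      by_cases hpj : cs_isprime j = true
      · rw [if_pos (Or.inl ⟨by omega, hpj⟩)]
        show acc = _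
        have hFL : F ++ [L] = [j] := by rw [← hpf, pf_prime j (by omega) hpj]
        have hF : F = [] := by
          cases F with
          | nil => rfl
          | cons a t =>
            exfalso
            have := congrArg List.length hFL
            simp only [List.length_append, List.length_cons] at this
            omega
        subst hF
        simp only [hcb, List.nil_append]
        norm_num
      · rw [if_neg (by rintro (⟨_, h⟩ | h); exact hpj h; exact hhs h)]
        have hps : (([] : List Int) ++ F) ++ [L] = plist n j := by
          rw [List.nil_append, ← pf_eq_plist n j (by omega) (by omega) hpj, hpf]
        have hlen : 2 ≤ ((([] : List Int) ++ F) ++ [L]).length := by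
          rw [hps]
          obtain ⟨p, hp2, hpp, hpd, hpl⟩ := exists_prime_divisor j (by omega)
          have hplt : p < j := by
            rcases lt_or_eq_of_le hpl with h | h
            · exact h
            · exact absurd (h ▸ hpp) hpj
          obtain ⟨t, ht⟩ := hpd
          have ht2 : 2 ≤ t := by nlinarith
          obtain ⟨q, hq2, hqp, hqd, hql⟩ := exists_prime_divisor t ht2
          have hqj : q ∣ j := ht ▸ Dvd.dvd.mul_left hqd p
          have hqlt : q < j := by nlinarith
          have hqne : q ≠ p := by
            intro hqe
            have hsq2 : q*q ∣ j := by
              obtain ⟨u, hu⟩ := hqd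
              exact ⟨u, by rw [ht, hu, hqe]; ring⟩
            exact hsqf q hq2 hqp hqj hsq2
          exact two_le_length_of_mem_ne
            ((mem_plist_iff n j q).mpr ⟨hq2, hqlt, by omega, hqp, hqj⟩)
            ((mem_plist_iff n j p).mpr ⟨hp2, hplt, by omega, hpp, ⟨t, ht⟩⟩) hqne
        show _ = _
        simp only [hcb]
        rw [if_pos trivial, if_pos hlen, hps]
    · have hhs : hasSq n j = true :=
        (hasSq_iff_not_sqf n j (by omega) (by omega)).mpr hsqf
      rw [if_pos (Or.inr hhs)]
      show acc = _
      have hfac := (fac_spec n (by omega) j.toNat j [] le_rfl (by omega) (by omega)).2 hsqf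
      cases hr : cb_fac (cb_spf n) j [] with
      | mk a bc =>
        rw [hr] at hfac
        cases bc with
        | mk b c =>
          simp only at hfac
          simp only [hfac]
          rfl

-- ===== VERDICT (by name: the statement is the Claim_ definition above) =====
theorem cool_sieve_spec : Claim_equal_cool_sieve := by
  intro n _
  exact main_eq n
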